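-- pv_equiv track=rewrite | github.com/Hikarius/Exchange-Rate-Forecasting-with-News-Data | frontend&prediction.py | int2str
-- ===== SOURCE A (Python) =====
-- def int2str(s):
--     l1 = s.split()
--     l2 = []
--     for each in l1 :
--         if each.isalpha():
--             l2.append(each)
--             l2.append(' ')
--         else:
--             if each.isnumeric():
--                 e = int(each)
--                 if e>2050 or e<1980:
--                     if e > 5000:
--                         e=5000
--                     elif e > 1000:
--                         e=1000
--                     elif e > 900:
--                         e=900
--                     elif e >800:
--                         e=800
--                     elif e >700:
--                         e=700
--                     elif e >600:
--                         e=600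
--                     elif e >500:
--                         e=500
--                     elif e >400:
--                         e=400
--                     elif e >300:
--                         e=300
--                     elif e >200:
--                         e=200
--                     elif e >100:
--                         e=100
--                     elif e >90:
--                         e=90
--                     elif e >80:
--                         e=80
--                     elif e >70:
--                         e=70
--                     elif e >60:
--                         e=60
--                     elif e >50:
--                         e=50
--                     elif e >40:
--                         e=40
--                     elif e >30:
--                         e=30
--                     elif e >20:
--                         e=20
--                     elif e >10:
--                         e=10
--                     elif e >5:
--                         e=5
--                     elif e >1:
--                         e=1
--                 each = str(e)
--                 l2.append(each)
--                 l2.append(' ')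
--
--
--     return ''.join(l2)
-- ===== SOURCE B (Python) =====
-- _BUCKETS = [1, 5, 10, 20, 30, 40, 50, 60, 70, 80, 90,
--             100, 200, 300, 400, 500, 600, 700, 800, 900, 1000, 5000]
--
--
-- def _bisect_left(a, x):
--     # leftmost insertion point of x in the sorted list a (hand-rolled: A imports nothing)
--     lo, hi = 0, len(a)
--     while lo < hi:
--         mid = (lo + hi) // 2
--         if a[mid] < x:
--             lo = mid + 1
--         else:
--             hi = mid
--     return lo
--
--
-- def int2str(s):
--     out = []
--     for w in s.split():
--         if w.isalpha():
--             out.append(w)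
--         elif w.isnumeric():
--             e = int(w)
--             if e > 2050 or e < 1980:
--                 i = _bisect_left(_BUCKETS, e)
--                 if i > 0:
--                     e = _BUCKETS[i - 1]
--             out.append(str(e))
--     return ''.join(w + ' ' for w in out)
-- ===== Notes on version B (the rewrite author's own statement) =====
-- stated objective: idiomatic
-- what changed: The 23-branch if/elif rounding chain is replaced by a sorted threshold table plus a hand-rolled binary search (bisect_left): e becomes the largest table entry strictly below it; the interleaved word/space list is replaced by a word list joined with trailing spaces.
import Mathlib
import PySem

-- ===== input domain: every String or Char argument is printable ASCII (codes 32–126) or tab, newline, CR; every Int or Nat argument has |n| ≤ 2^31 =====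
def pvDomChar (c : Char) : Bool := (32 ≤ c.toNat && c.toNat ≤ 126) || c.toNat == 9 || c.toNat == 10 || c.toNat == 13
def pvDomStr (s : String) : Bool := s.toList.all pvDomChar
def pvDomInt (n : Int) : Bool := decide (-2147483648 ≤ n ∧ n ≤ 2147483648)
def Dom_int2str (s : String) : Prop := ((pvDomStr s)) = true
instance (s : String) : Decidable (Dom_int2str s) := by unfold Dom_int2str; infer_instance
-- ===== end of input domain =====

-- B replaces A's 23-branch if/elif rounding chain by a sorted threshold table with a
-- binary search (bisect_left) and joins kept words with trailing spaces (idiomatic rewrite).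


-- ===== PORT A =====
-- A's inner if/elif rounding chain, extracted verbatim as a helper
def roundChainA (e : Int) : Int :=
  if e > 5000 then 5000
  else if e > 1000 then 1000
  else if e > 900 then 900
  else if e > 800 then 800
  else if e > 700 then 700
  else if e > 600 then 600
  else if e > 500 then 500
  else if e > 400 then 400
  else if e > 300 then 300
  else if e > 200 then 200
  else if e > 100 then 100
  else if e > 90 then 90
  else if e > 80 then 80
  else if e > 70 then 70
  else if e > 60 then 60
  else if e > 50 then 50
  else if e > 40 then 40
  else if e > 30 then 30
  else if e > 20 then 20
  else if e > 10 then 10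
  else if e > 5 then 5
  else if e > 1 then 1
  else e

def int2str (s : String) : String :=
  let l1 := PySem.Str.split₀ s
  let l2 := l1.foldl (fun l2 each =>
    if PySem.Str.strIsalpha each then
      l2 ++ [each] ++ [" "]
    else if PySem.Str.strIsdigit each then   -- isnumeric: exact on the ASCII domain, where isnumeric = isdigit
      match PySem.Int.ofStr? each with       -- int(each); never none on an isdigit word
      | some e0 =>
        let e := if e0 > 2050 ∨ e0 < 1980 then roundChainA e0 else e0
        l2 ++ [PySem.Int.toStr e] ++ [" "]
      | none => l2
    else l2) []
  PySem.Str.join "" l2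

-- ===== PORT B =====
def bucketsB : List Int :=
  [1, 5, 10, 20, 30, 40, 50, 60, 70, 80, 90,
   100, 200, 300, 400, 500, 600, 700, 800, 900, 1000, 5000]

-- Source B's hand-rolled bisect_left while-loop (fuel = interval size; the loop shrinks it each step)
def bisectGoB (a : List Int) (x : Int) : Nat → Nat → Nat → Nat
  | 0, lo, _ => lo
  | fuel + 1, lo, hi =>
    if lo < hi then
      let mid := (lo + hi) / 2
      if a.getD mid 0 < x then bisectGoB a x fuel (mid + 1) hi
      else bisectGoB a x fuel lo mid
    else lo

def bisectLeftB (a : List Int) (x : Int) : Nat :=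
  bisectGoB a x a.length 0 a.length

def int2str_alt (s : String) : String :=
  let out := (PySem.Str.split₀ s).foldl (fun out w =>
    if PySem.Str.strIsalpha w then
      out ++ [w]
    else if PySem.Str.strIsdigit w then     -- isnumeric: exact on the ASCII domain
      match PySem.Int.ofStr? w with         -- int(w); never none on an isdigit word
      | some e0 =>
        let e := if e0 > 2050 ∨ e0 < 1980 then
            let i := bisectLeftB bucketsB e0
            if 0 < i then bucketsB.getD (i - 1) 0 else e0
          else e0
        out ++ [PySem.Int.toStr e]
      | none => out
    else out) []
  PySem.Str.join "" (out.map (fun w => w ++ " "))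

-- ===== PRECONDITION & SPEC =====
def Spec_int2str (s : String) (out : String) : Prop := out = int2str_alt s
instance (s : String) (out : String) : Decidable (Spec_int2str s out) := by unfold Spec_int2str; infer_instance

-- ===== CLAIM (what is proved, stated in full; the proofs are below) =====
def Claim_equal_int2str : Prop := ∀ (s : String), Dom_int2str s → Spec_int2str s (int2str s)

-- ===== LEMMAS AND PROOFS =====

-- a sorted list is monotone in its (in-range) getD entries
theorem sorted_getD_le (a : List Int) (hs : a.Pairwise (· ≤ ·)) (i j : Nat)
    (hij : i ≤ j) (hj : j < a.length) : a.getD i 0 ≤ a.getD j 0 := by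
  rcases Nat.eq_or_lt_of_le hij with h | h
  · subst h; exact le_refl _
  · rw [List.getD_eq_getElem a 0 (by omega), List.getD_eq_getElem a 0 hj]
    exact List.pairwise_iff_getElem.mp hs i j (by omega) hj h

-- loop invariant of Source B's bisect_left while-loop: everything left of the result is < x,
-- everything from the result up to hi is ≥ x
theorem go_inv (a : List Int) (x : Int) (hs : a.Pairwise (· ≤ ·)) :
    ∀ (fuel lo hi : Nat), hi - lo ≤ fuel → lo ≤ hi → hi ≤ a.length →
      lo ≤ bisectGoB a x fuel lo hi ∧ bisectGoB a x fuel lo hi ≤ hi ∧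
      (∀ j, lo ≤ j → j < bisectGoB a x fuel lo hi → a.getD j 0 < x) ∧
      (∀ j, bisectGoB a x fuel lo hi ≤ j → j < hi → ¬ a.getD j 0 < x) := by
  intro fuel
  induction fuel with
  | zero =>
    intro lo hi h1 h2 h3
    have : lo = hi := by omega
    subst this
    exact ⟨le_refl _, le_refl _, fun j h1 h2 => absurd h2 (by simp [bisectGoB]; omega),
      fun j h1 h2 => absurd h2 (by simp [bisectGoB] at h1; omega)⟩
  | succ fuel ih =>
    intro lo hi h1 h2 h3
    by_cases hlh : lo < hi
    · rw [show bisectGoB a x (fuel+1) lo hi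
          = (if lo < hi then
              if a.getD ((lo+hi)/2) 0 < x then bisectGoB a x fuel ((lo+hi)/2 + 1) hi
              else bisectGoB a x fuel lo ((lo+hi)/2)
            else lo) from rfl, if_pos hlh]
      by_cases hm : a.getD ((lo+hi)/2) 0 < x
      · rw [if_pos hm]
        obtain ⟨r1, r2, r3, r4⟩ := ih ((lo+hi)/2 + 1) hi (by omega) (by omega) h3
        refine ⟨by omega, r2, ?_, r4⟩
        intro j hj1 hj2
        by_cases hj : (lo+hi)/2 + 1 ≤ j
        · exact r3 j hj hj2
        · exact lt_of_le_of_lt (sorted_getD_le a hs j ((lo+hi)/2) (by omega) (by omega)) hm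
      · rw [if_neg hm]
        obtain ⟨r1, r2, r3, r4⟩ := ih lo ((lo+hi)/2) (by omega) (by omega) (by omega)
        refine ⟨r1, by omega, r3, ?_⟩
        intro j hj1 hj2 hlt
        by_cases hj : j < (lo+hi)/2
        · exact r4 j hj1 hj hlt
        · exact hm (lt_of_le_of_lt (sorted_getD_le a hs ((lo+hi)/2) j (by omega) (by omega)) hlt)
    · rw [show bisectGoB a x (fuel+1) lo hi
          = (if lo < hi then
              if a.getD ((lo+hi)/2) 0 < x then bisectGoB a x fuel ((lo+hi)/2 + 1) hi
              else bisectGoB a x fuel lo ((lo+hi)/2)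
            else lo) from rfl, if_neg hlh]
      exact ⟨le_refl _, h2, by omega, by omega⟩

-- B's table lookup (largest threshold strictly below e) computes exactly A's rounding chain
set_option maxHeartbeats 2000000 in
theorem bucketB_eq_roundChainA (e : Int) :
    (if 0 < bisectLeftB bucketsB e then bucketsB.getD (bisectLeftB bucketsB e - 1) 0 else e)
      = roundChainA e := by
  obtain ⟨h1, h2, h3, h4⟩ := go_inv bucketsB e (by decide) 22 0 22 (by decide) (by decide) (by decide)
  rw [show bisectLeftB bucketsB e = bisectGoB bucketsB e 22 0 22 from rfl]
  generalize hg : bisectGoB bucketsB e 22 0 22 = r at h2 h3 h4 ⊢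
  have ha0 : 0 < r → (1 : Int) < e := fun h => by simpa [bucketsB] using h3 0 (by omega) h
  have hb0 : r ≤ 0 → e ≤ (1 : Int) := fun h => by simpa [bucketsB] using not_lt.mp (h4 0 h (by omega))
  have ha1 : 1 < r → (5 : Int) < e := fun h => by simpa [bucketsB] using h3 1 (by omega) h
  have hb1 : r ≤ 1 → e ≤ (5 : Int) := fun h => by simpa [bucketsB] using not_lt.mp (h4 1 h (by omega))
  have ha2 : 2 < r → (10 : Int) < e := fun h => by simpa [bucketsB] using h3 2 (by omega) h
  have hb2 : r ≤ 2 → e ≤ (10 : Int) := fun h => by simpa [bucketsB] using not_lt.mp (h4 2 h (by omega))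
  have ha3 : 3 < r → (20 : Int) < e := fun h => by simpa [bucketsB] using h3 3 (by omega) h
  have hb3 : r ≤ 3 → e ≤ (20 : Int) := fun h => by simpa [bucketsB] using not_lt.mp (h4 3 h (by omega))
  have ha4 : 4 < r → (30 : Int) < e := fun h => by simpa [bucketsB] using h3 4 (by omega) h
  have hb4 : r ≤ 4 → e ≤ (30 : Int) := fun h => by simpa [bucketsB] using not_lt.mp (h4 4 h (by omega))
  have ha5 : 5 < r → (40 : Int) < e := fun h => by simpa [bucketsB] using h3 5 (by omega) h
  have hb5 : r ≤ 5 → e ≤ (40 : Int) := fun h => by simpa [bucketsB] using not_lt.mp (h4 5 h (by omega))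
  have ha6 : 6 < r → (50 : Int) < e := fun h => by simpa [bucketsB] using h3 6 (by omega) h
  have hb6 : r ≤ 6 → e ≤ (50 : Int) := fun h => by simpa [bucketsB] using not_lt.mp (h4 6 h (by omega))
  have ha7 : 7 < r → (60 : Int) < e := fun h => by simpa [bucketsB] using h3 7 (by omega) h
  have hb7 : r ≤ 7 → e ≤ (60 : Int) := fun h => by simpa [bucketsB] using not_lt.mp (h4 7 h (by omega))
  have ha8 : 8 < r → (70 : Int) < e := fun h => by simpa [bucketsB] using h3 8 (by omega) h
  have hb8 : r ≤ 8 → e ≤ (70 : Int) := fun h => by simpa [bucketsB] using not_lt.mp (h4 8 h (by omega))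
  have ha9 : 9 < r → (80 : Int) < e := fun h => by simpa [bucketsB] using h3 9 (by omega) h
  have hb9 : r ≤ 9 → e ≤ (80 : Int) := fun h => by simpa [bucketsB] using not_lt.mp (h4 9 h (by omega))
  have ha10 : 10 < r → (90 : Int) < e := fun h => by simpa [bucketsB] using h3 10 (by omega) h
  have hb10 : r ≤ 10 → e ≤ (90 : Int) := fun h => by simpa [bucketsB] using not_lt.mp (h4 10 h (by omega))
  have ha11 : 11 < r → (100 : Int) < e := fun h => by simpa [bucketsB] using h3 11 (by omega) h
  have hb11 : r ≤ 11 → e ≤ (100 : Int) := fun h => by simpa [bucketsB] using not_lt.mp (h4 11 h (by omega))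
  have ha12 : 12 < r → (200 : Int) < e := fun h => by simpa [bucketsB] using h3 12 (by omega) h
  have hb12 : r ≤ 12 → e ≤ (200 : Int) := fun h => by simpa [bucketsB] using not_lt.mp (h4 12 h (by omega))
  have ha13 : 13 < r → (300 : Int) < e := fun h => by simpa [bucketsB] using h3 13 (by omega) h
  have hb13 : r ≤ 13 → e ≤ (300 : Int) := fun h => by simpa [bucketsB] using not_lt.mp (h4 13 h (by omega))
  have ha14 : 14 < r → (400 : Int) < e := fun h => by simpa [bucketsB] using h3 14 (by omega) h
  have hb14 : r ≤ 14 → e ≤ (400 : Int) := fun h => by simpa [bucketsB] using not_lt.mp (h4 14 h (by omega))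
  have ha15 : 15 < r → (500 : Int) < e := fun h => by simpa [bucketsB] using h3 15 (by omega) h
  have hb15 : r ≤ 15 → e ≤ (500 : Int) := fun h => by simpa [bucketsB] using not_lt.mp (h4 15 h (by omega))
  have ha16 : 16 < r → (600 : Int) < e := fun h => by simpa [bucketsB] using h3 16 (by omega) h
  have hb16 : r ≤ 16 → e ≤ (600 : Int) := fun h => by simpa [bucketsB] using not_lt.mp (h4 16 h (by omega))
  have ha17 : 17 < r → (700 : Int) < e := fun h => by simpa [bucketsB] using h3 17 (by omega) h
  have hb17 : r ≤ 17 → e ≤ (700 : Int) := fun h => by simpa [bucketsB] using not_lt.mp (h4 17 h (by omega))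
  have ha18 : 18 < r → (800 : Int) < e := fun h => by simpa [bucketsB] using h3 18 (by omega) h
  have hb18 : r ≤ 18 → e ≤ (800 : Int) := fun h => by simpa [bucketsB] using not_lt.mp (h4 18 h (by omega))
  have ha19 : 19 < r → (900 : Int) < e := fun h => by simpa [bucketsB] using h3 19 (by omega) h
  have hb19 : r ≤ 19 → e ≤ (900 : Int) := fun h => by simpa [bucketsB] using not_lt.mp (h4 19 h (by omega))
  have ha20 : 20 < r → (1000 : Int) < e := fun h => by simpa [bucketsB] using h3 20 (by omega) h
  have hb20 : r ≤ 20 → e ≤ (1000 : Int) := fun h => by simpa [bucketsB] using not_lt.mp (h4 20 h (by omega))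
  have ha21 : 21 < r → (5000 : Int) < e := fun h => by simpa [bucketsB] using h3 21 (by omega) h
  have hb21 : r ≤ 21 → e ≤ (5000 : Int) := fun h => by simpa [bucketsB] using not_lt.mp (h4 21 h (by omega))
  clear h1 h3 h4 hg
  by_cases hc0 : e ≤ 1
  · have hr : r = 0 := by
      by_contra h
      have := ha0 (by omega)
      omega
    subst hr
    rw [if_neg (by norm_num : ¬ (0:Nat) < 0)]
    simp only [roundChainA]
    rw [if_neg (by omega), if_neg (by omega), if_neg (by omega), if_neg (by omega), if_neg (by omega), if_neg (by omega), if_neg (by omega), if_neg (by omega), if_neg (by omega), if_neg (by omega), if_neg (by omega), if_neg (by omega), if_neg (by omega), if_neg (by omega), if_neg (by omega), if_neg (by omega), if_neg (by omega), if_neg (by omega), if_neg (by omega), if_neg (by omega), if_neg (by omega), if_neg (by omega)]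
  by_cases hc1 : e ≤ 5
  · have h5 : r ≤ 1 := by
      by_contra h
      have := ha1 (by omega)
      omega
    have h6 : 1 ≤ r := by
      by_contra h
      have := hb0 (by omega)
      omega
    have hr : r = 1 := by omega
    subst hr
    rw [if_pos (by norm_num : (0:Nat) < 1),
      show bucketsB.getD (1 - 1) 0 = (1:Int) from by norm_num [bucketsB, List.getD]]
    simp only [roundChainA]
    rw [if_neg (by omega), if_neg (by omega), if_neg (by omega), if_neg (by omega), if_neg (by omega), if_neg (by omega), if_neg (by omega), if_neg (by omega), if_neg (by omega), if_neg (by omega), if_neg (by omega), if_neg (by omega), if_neg (by omega), if_neg (by omega), if_neg (by omega), if_neg (by omega), if_neg (by omega), if_neg (by omega), if_neg (by omega), if_neg (by omega), if_neg (by omega), if_pos (by omega)]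
  by_cases hc2 : e ≤ 10
  · have h5 : r ≤ 2 := by
      by_contra h
      have := ha2 (by omega)
      omega
    have h6 : 2 ≤ r := by
      by_contra h
      have := hb1 (by omega)
      omega
    have hr : r = 2 := by omega
    subst hr
    rw [if_pos (by norm_num : (0:Nat) < 2),
      show bucketsB.getD (2 - 1) 0 = (5:Int) from by norm_num [bucketsB, List.getD]]
    simp only [roundChainA]
    rw [if_neg (by omega), if_neg (by omega), if_neg (by omega), if_neg (by omega), if_neg (by omega), if_neg (by omega), if_neg (by omega), if_neg (by omega), if_neg (by omega), if_neg (by omega), if_neg (by omega), if_neg (by omega), if_neg (by omega), if_neg (by omega), if_neg (by omega), if_neg (by omega), if_neg (by omega), if_neg (by omega), if_neg (by omega), if_neg (by omega), if_pos (by omega)]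
  by_cases hc3 : e ≤ 20
  · have h5 : r ≤ 3 := by
      by_contra h
      have := ha3 (by omega)
      omega
    have h6 : 3 ≤ r := by
      by_contra h
      have := hb2 (by omega)
      omega
    have hr : r = 3 := by omega
    subst hr
    rw [if_pos (by norm_num : (0:Nat) < 3),
      show bucketsB.getD (3 - 1) 0 = (10:Int) from by norm_num [bucketsB, List.getD]]
    simp only [roundChainA]
    rw [if_neg (by omega), if_neg (by omega), if_neg (by omega), if_neg (by omega), if_neg (by omega), if_neg (by omega), if_neg (by omega), if_neg (by omega), if_neg (by omega), if_neg (by omega), if_neg (by omega), if_neg (by omega), if_neg (by omega), if_neg (by omega), if_neg (by omega), if_neg (by omega), if_neg (by omega), if_neg (by omega), if_neg (by omega), if_pos (by omega)]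
  by_cases hc4 : e ≤ 30
  · have h5 : r ≤ 4 := by
      by_contra h
      have := ha4 (by omega)
      omega
    have h6 : 4 ≤ r := by
      by_contra h
      have := hb3 (by omega)
      omega
    have hr : r = 4 := by omega
    subst hr
    rw [if_pos (by norm_num : (0:Nat) < 4),
      show bucketsB.getD (4 - 1) 0 = (20:Int) from by norm_num [bucketsB, List.getD]]
    simp only [roundChainA]
    rw [if_neg (by omega), if_neg (by omega), if_neg (by omega), if_neg (by omega), if_neg (by omega), if_neg (by omega), if_neg (by omega), if_neg (by omega), if_neg (by omega), if_neg (by omega), if_neg (by omega), if_neg (by omega), if_neg (by omega), if_neg (by omega), if_neg (by omega), if_neg (by omega), if_neg (by omega), if_neg (by omega), if_pos (by omega)]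
  by_cases hc5 : e ≤ 40
  · have h5 : r ≤ 5 := by
      by_contra h
      have := ha5 (by omega)
      omega
    have h6 : 5 ≤ r := by
      by_contra h
      have := hb4 (by omega)
      omega
    have hr : r = 5 := by omega
    subst hr
    rw [if_pos (by norm_num : (0:Nat) < 5),
      show bucketsB.getD (5 - 1) 0 = (30:Int) from by norm_num [bucketsB, List.getD]]
    simp only [roundChainA]
    rw [if_neg (by omega), if_neg (by omega), if_neg (by omega), if_neg (by omega), if_neg (by omega), if_neg (by omega), if_neg (by omega), if_neg (by omega), if_neg (by omega), if_neg (by omega), if_neg (by omega), if_neg (by omega), if_neg (by omega), if_neg (by omega), if_neg (by omega), if_neg (by omega), if_neg (by omega), if_pos (by omega)]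
  by_cases hc6 : e ≤ 50
  · have h5 : r ≤ 6 := by
      by_contra h
      have := ha6 (by omega)
      omega
    have h6 : 6 ≤ r := by
      by_contra h
      have := hb5 (by omega)
      omega
    have hr : r = 6 := by omega
    subst hr
    rw [if_pos (by norm_num : (0:Nat) < 6),
      show bucketsB.getD (6 - 1) 0 = (40:Int) from by norm_num [bucketsB, List.getD]]
    simp only [roundChainA]
    rw [if_neg (by omega), if_neg (by omega), if_neg (by omega), if_neg (by omega), if_neg (by omega), if_neg (by omega), if_neg (by omega), if_neg (by omega), if_neg (by omega), if_neg (by omega), if_neg (by omega), if_neg (by omega), if_neg (by omega), if_neg (by omega), if_neg (by omega), if_neg (by omega), if_pos (by omega)]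
  by_cases hc7 : e ≤ 60
  · have h5 : r ≤ 7 := by
      by_contra h
      have := ha7 (by omega)
      omega
    have h6 : 7 ≤ r := by
      by_contra h
      have := hb6 (by omega)
      omega
    have hr : r = 7 := by omega
    subst hr
    rw [if_pos (by norm_num : (0:Nat) < 7),
      show bucketsB.getD (7 - 1) 0 = (50:Int) from by norm_num [bucketsB, List.getD]]
    simp only [roundChainA]
    rw [if_neg (by omega), if_neg (by omega), if_neg (by omega), if_neg (by omega), if_neg (by omega), if_neg (by omega), if_neg (by omega), if_neg (by omega), if_neg (by omega), if_neg (by omega), if_neg (by omega), if_neg (by omega), if_neg (by omega), if_neg (by omega), if_neg (by omega), if_pos (by omega)]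
  by_cases hc8 : e ≤ 70
  · have h5 : r ≤ 8 := by
      by_contra h
      have := ha8 (by omega)
      omega
    have h6 : 8 ≤ r := by
      by_contra h
      have := hb7 (by omega)
      omega
    have hr : r = 8 := by omega
    subst hr
    rw [if_pos (by norm_num : (0:Nat) < 8),
      show bucketsB.getD (8 - 1) 0 = (60:Int) from by norm_num [bucketsB, List.getD]]
    simp only [roundChainA]
    rw [if_neg (by omega), if_neg (by omega), if_neg (by omega), if_neg (by omega), if_neg (by omega), if_neg (by omega), if_neg (by omega), if_neg (by omega), if_neg (by omega), if_neg (by omega), if_neg (by omega), if_neg (by omega), if_neg (by omega), if_neg (by omega), if_pos (by omega)]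
  by_cases hc9 : e ≤ 80
  · have h5 : r ≤ 9 := by
      by_contra h
      have := ha9 (by omega)
      omega
    have h6 : 9 ≤ r := by
      by_contra h
      have := hb8 (by omega)
      omega
    have hr : r = 9 := by omega
    subst hr
    rw [if_pos (by norm_num : (0:Nat) < 9),
      show bucketsB.getD (9 - 1) 0 = (70:Int) from by norm_num [bucketsB, List.getD]]
    simp only [roundChainA]
    rw [if_neg (by omega), if_neg (by omega), if_neg (by omega), if_neg (by omega), if_neg (by omega), if_neg (by omega), if_neg (by omega), if_neg (by omega), if_neg (by omega), if_neg (by omega), if_neg (by omega), if_neg (by omega), if_neg (by omega), if_pos (by omega)]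
  by_cases hc10 : e ≤ 90
  · have h5 : r ≤ 10 := by
      by_contra h
      have := ha10 (by omega)
      omega
    have h6 : 10 ≤ r := by
      by_contra h
      have := hb9 (by omega)
      omega
    have hr : r = 10 := by omega
    subst hr
    rw [if_pos (by norm_num : (0:Nat) < 10),
      show bucketsB.getD (10 - 1) 0 = (80:Int) from by norm_num [bucketsB, List.getD]]
    simp only [roundChainA]
    rw [if_neg (by omega), if_neg (by omega), if_neg (by omega), if_neg (by omega), if_neg (by omega), if_neg (by omega), if_neg (by omega), if_neg (by omega), if_neg (by omega), if_neg (by omega), if_neg (by omega), if_neg (by omega), if_pos (by omega)]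
  by_cases hc11 : e ≤ 100
  · have h5 : r ≤ 11 := by
      by_contra h
      have := ha11 (by omega)
      omega
    have h6 : 11 ≤ r := by
      by_contra h
      have := hb10 (by omega)
      omega
    have hr : r = 11 := by omega
    subst hr
    rw [if_pos (by norm_num : (0:Nat) < 11),
      show bucketsB.getD (11 - 1) 0 = (90:Int) from by norm_num [bucketsB, List.getD]]
    simp only [roundChainA]
    rw [if_neg (by omega), if_neg (by omega), if_neg (by omega), if_neg (by omega), if_neg (by omega), if_neg (by omega), if_neg (by omega), if_neg (by omega), if_neg (by omega), if_neg (by omega), if_neg (by omega), if_pos (by omega)]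
  by_cases hc12 : e ≤ 200
  · have h5 : r ≤ 12 := by
      by_contra h
      have := ha12 (by omega)
      omega
    have h6 : 12 ≤ r := by
      by_contra h
      have := hb11 (by omega)
      omega
    have hr : r = 12 := by omega
    subst hr
    rw [if_pos (by norm_num : (0:Nat) < 12),
      show bucketsB.getD (12 - 1) 0 = (100:Int) from by norm_num [bucketsB, List.getD]]
    simp only [roundChainA]
    rw [if_neg (by omega), if_neg (by omega), if_neg (by omega), if_neg (by omega), if_neg (by omega), if_neg (by omega), if_neg (by omega), if_neg (by omega), if_neg (by omega), if_neg (by omega), if_pos (by omega)]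
  by_cases hc13 : e ≤ 300
  · have h5 : r ≤ 13 := by
      by_contra h
      have := ha13 (by omega)
      omega
    have h6 : 13 ≤ r := by
      by_contra h
      have := hb12 (by omega)
      omega
    have hr : r = 13 := by omega
    subst hr
    rw [if_pos (by norm_num : (0:Nat) < 13),
      show bucketsB.getD (13 - 1) 0 = (200:Int) from by norm_num [bucketsB, List.getD]]
    simp only [roundChainA]
    rw [if_neg (by omega), if_neg (by omega), if_neg (by omega), if_neg (by omega), if_neg (by omega), if_neg (by omega), if_neg (by omega), if_neg (by omega), if_neg (by omega), if_pos (by omega)]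
  by_cases hc14 : e ≤ 400
  · have h5 : r ≤ 14 := by
      by_contra h
      have := ha14 (by omega)
      omega
    have h6 : 14 ≤ r := by
      by_contra h
      have := hb13 (by omega)
      omega
    have hr : r = 14 := by omega
    subst hr
    rw [if_pos (by norm_num : (0:Nat) < 14),
      show bucketsB.getD (14 - 1) 0 = (300:Int) from by norm_num [bucketsB, List.getD]]
    simp only [roundChainA]
    rw [if_neg (by omega), if_neg (by omega), if_neg (by omega), if_neg (by omega), if_neg (by omega), if_neg (by omega), if_neg (by omega), if_neg (by omega), if_pos (by omega)]
  by_cases hc15 : e ≤ 500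
  · have h5 : r ≤ 15 := by
      by_contra h
      have := ha15 (by omega)
      omega
    have h6 : 15 ≤ r := by
      by_contra h
      have := hb14 (by omega)
      omega
    have hr : r = 15 := by omega
    subst hr
    rw [if_pos (by norm_num : (0:Nat) < 15),
      show bucketsB.getD (15 - 1) 0 = (400:Int) from by norm_num [bucketsB, List.getD]]
    simp only [roundChainA]
    rw [if_neg (by omega), if_neg (by omega), if_neg (by omega), if_neg (by omega), if_neg (by omega), if_neg (by omega), if_neg (by omega), if_pos (by omega)]
  by_cases hc16 : e ≤ 600
  · have h5 : r ≤ 16 := by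
      by_contra h
      have := ha16 (by omega)
      omega
    have h6 : 16 ≤ r := by
      by_contra h
      have := hb15 (by omega)
      omega
    have hr : r = 16 := by omega
    subst hr
    rw [if_pos (by norm_num : (0:Nat) < 16),
      show bucketsB.getD (16 - 1) 0 = (500:Int) from by norm_num [bucketsB, List.getD]]
    simp only [roundChainA]
    rw [if_neg (by omega), if_neg (by omega), if_neg (by omega), if_neg (by omega), if_neg (by omega), if_neg (by omega), if_pos (by omega)]
  by_cases hc17 : e ≤ 700
  · have h5 : r ≤ 17 := by
      by_contra h
      have := ha17 (by omega)
      omega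
    have h6 : 17 ≤ r := by
      by_contra h
      have := hb16 (by omega)
      omega
    have hr : r = 17 := by omega
    subst hr
    rw [if_pos (by norm_num : (0:Nat) < 17),
      show bucketsB.getD (17 - 1) 0 = (600:Int) from by norm_num [bucketsB, List.getD]]
    simp only [roundChainA]
    rw [if_neg (by omega), if_neg (by omega), if_neg (by omega), if_neg (by omega), if_neg (by omega), if_pos (by omega)]
  by_cases hc18 : e ≤ 800
  · have h5 : r ≤ 18 := by
      by_contra h
      have := ha18 (by omega)
      omega
    have h6 : 18 ≤ r := by
      by_contra h
      have := hb17 (by omega)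
      omega
    have hr : r = 18 := by omega
    subst hr
    rw [if_pos (by norm_num : (0:Nat) < 18),
      show bucketsB.getD (18 - 1) 0 = (700:Int) from by norm_num [bucketsB, List.getD]]
    simp only [roundChainA]
    rw [if_neg (by omega), if_neg (by omega), if_neg (by omega), if_neg (by omega), if_pos (by omega)]
  by_cases hc19 : e ≤ 900
  · have h5 : r ≤ 19 := by
      by_contra h
      have := ha19 (by omega)
      omega
    have h6 : 19 ≤ r := by
      by_contra h
      have := hb18 (by omega)
      omega
    have hr : r = 19 := by omega
    subst hr
    rw [if_pos (by norm_num : (0:Nat) < 19),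
      show bucketsB.getD (19 - 1) 0 = (800:Int) from by norm_num [bucketsB, List.getD]]
    simp only [roundChainA]
    rw [if_neg (by omega), if_neg (by omega), if_neg (by omega), if_pos (by omega)]
  by_cases hc20 : e ≤ 1000
  · have h5 : r ≤ 20 := by
      by_contra h
      have := ha20 (by omega)
      omega
    have h6 : 20 ≤ r := by
      by_contra h
      have := hb19 (by omega)
      omega
    have hr : r = 20 := by omega
    subst hr
    rw [if_pos (by norm_num : (0:Nat) < 20),
      show bucketsB.getD (20 - 1) 0 = (900:Int) from by norm_num [bucketsB, List.getD]]
    simp only [roundChainA]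
    rw [if_neg (by omega), if_neg (by omega), if_pos (by omega)]
  by_cases hc21 : e ≤ 5000
  · have h5 : r ≤ 21 := by
      by_contra h
      have := ha21 (by omega)
      omega
    have h6 : 21 ≤ r := by
      by_contra h
      have := hb20 (by omega)
      omega
    have hr : r = 21 := by omega
    subst hr
    rw [if_pos (by norm_num : (0:Nat) < 21),
      show bucketsB.getD (21 - 1) 0 = (1000:Int) from by norm_num [bucketsB, List.getD]]
    simp only [roundChainA]
    rw [if_neg (by omega), if_pos (by omega)]
  · have h6 : 22 ≤ r := by
      by_contra h
      have := hb21 (by omega)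
      omega
    have hr : r = 22 := by omega
    subst hr
    rw [if_pos (by norm_num : (0:Nat) < 22),
      show bucketsB.getD (22 - 1) 0 = (5000:Int) from by norm_num [bucketsB, List.getD]]
    simp only [roundChainA]
    rw [if_pos (by omega)]

-- the per-word value B appends for a numeric word, rewritten to A's chain
theorem wordVal_eq (e0 : Int) :
    (if e0 > 2050 ∨ e0 < 1980 then
        let i := bisectLeftB bucketsB e0
        if 0 < i then bucketsB.getD (i - 1) 0 else e0
      else e0)
      = (if e0 > 2050 ∨ e0 < 1980 then roundChainA e0 else e0) := by
  by_cases h : e0 > 2050 ∨ e0 < 1980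
  · rw [if_pos h, if_pos h]; exact bucketB_eq_roundChainA e0
  · rw [if_neg h, if_neg h]

-- A's accumulator is B's accumulator with a space interleaved after every word
theorem fold_rel (ws : List String) (acc : List String) :
    ws.foldl (fun l2 each =>
      if PySem.Str.strIsalpha each then l2 ++ [each] ++ [" "]
      else if PySem.Str.strIsdigit each then
        match PySem.Int.ofStr? each with
        | some e0 =>
          let e := if e0 > 2050 ∨ e0 < 1980 then roundChainA e0 else e0
          l2 ++ [PySem.Int.toStr e] ++ [" "]
        | none => l2
      else l2) (acc.flatMap (fun w => [w, " "]))
    = (ws.foldl (fun out w =>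
        if PySem.Str.strIsalpha w then out ++ [w]
        else if PySem.Str.strIsdigit w then
          match PySem.Int.ofStr? w with
          | some e0 =>
            let e := if e0 > 2050 ∨ e0 < 1980 then roundChainA e0 else e0
            out ++ [PySem.Int.toStr e]
          | none => out
        else out) acc).flatMap (fun w => [w, " "]) := by
  induction ws generalizing acc with
  | nil => rfl
  | cons w ws ih =>
    simp only [List.foldl_cons]
    by_cases ha : PySem.Str.strIsalpha w = true
    · rw [if_pos ha, if_pos ha,
        show acc.flatMap (fun w => [w, " "]) ++ [w] ++ [" "]
            = (acc ++ [w]).flatMap (fun w => [w, " "]) by simp]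
      exact ih (acc ++ [w])
    · rw [if_neg ha, if_neg ha]
      by_cases hd : PySem.Str.strIsdigit w = true
      · rw [if_pos hd, if_pos hd]
        cases hof : PySem.Int.ofStr? w with
        | none => exact ih acc
        | some e0 =>
          dsimp only
          rw [show acc.flatMap (fun w => [w, " "])
                ++ [PySem.Int.toStr (if e0 > 2050 ∨ e0 < 1980 then roundChainA e0 else e0)] ++ [" "]
              = (acc ++ [PySem.Int.toStr (if e0 > 2050 ∨ e0 < 1980 then roundChainA e0 else e0)]).flatMap
                  (fun w => [w, " "]) by simp]
          exact ih _
      · rw [if_neg hd, if_neg hd]; exact ih acc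

-- joining with the empty separator is flattening
theorem join_nil_flatten (parts : List (List Char)) :
    PySem.Chars.join [] parts = parts.flatten := by
  induction parts with
  | nil => simp [PySem.Chars.join_nil]
  | cons p rest ih =>
    cases rest with
    | nil => simp [PySem.Chars.join_singleton]
    | cons q rest => rw [PySem.Chars.join_cons_cons, ih]; simp

-- joining the interleaved list equals joining the words with a trailing space each
theorem join_flatMap_eq (out : List String) :
    PySem.Str.join "" (out.flatMap (fun w => [w, " "]))
      = PySem.Str.join "" (out.map (fun w => w ++ " ")) := by
  rw [← String.toList_inj, PySem.Str.toList_join, PySem.Str.toList_join,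
    show ("" : String).toList = [] from rfl, join_nil_flatten, join_nil_flatten]
  induction out with
  | nil => rfl
  | cons w out ih => simp_all

-- ===== VERDICT (by name: the statement is the Claim_ definition above) =====
theorem int2str_spec : Claim_equal_int2str := by
  intro s _
  unfold Spec_int2str int2str int2str_alt
  simp only [wordVal_eq]
  have h := fold_rel (PySem.Str.split₀ s) []
  simp only [List.flatMap_nil] at h
  rw [h, join_flatMap_eq]
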